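-- pv_equiv track=rewrite | github.com/KarlKeisel/GeoChoroplethMap | automatic/patient_logic.py | age_round
-- ===== SOURCE A (Python) =====
-- def age_round(age):
--     if age > 80:
--         return 80
--     if age < 10:
--         return 10
--     while age % 10 != 0:
--         age += 1
--     return age
-- ===== SOURCE B (Python) =====
-- def age_round(age):
--     if age > 80:
--         return 80
--     if age < 10:
--         return 10
--     return ((age + 9) // 10) * 10
-- ===== Notes on version B (the rewrite author's own statement) =====
-- stated objective: idiomatic
-- what changed: Replaced A's increment-until-multiple-of-10 while loop with the closed-form ceiling-to-multiple ((age + 9) // 10) * 10.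
import Mathlib
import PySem

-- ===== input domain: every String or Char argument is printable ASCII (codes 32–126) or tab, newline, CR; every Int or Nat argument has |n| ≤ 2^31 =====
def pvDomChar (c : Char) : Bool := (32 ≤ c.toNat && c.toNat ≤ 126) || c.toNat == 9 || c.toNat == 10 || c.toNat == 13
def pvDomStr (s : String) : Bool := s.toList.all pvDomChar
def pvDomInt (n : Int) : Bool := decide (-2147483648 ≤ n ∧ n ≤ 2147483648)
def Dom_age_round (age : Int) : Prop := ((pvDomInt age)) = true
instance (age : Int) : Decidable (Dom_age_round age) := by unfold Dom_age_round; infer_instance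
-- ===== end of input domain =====

-- B replaces A's increment-until-multiple-of-10 loop with the closed-form ceiling ((age+9)//10)*10 (idiomatic; same values).


-- ===== PORT A =====
-- the while-loop of A: while age % 10 != 0: age += 1
-- structural recursion on a fuel bound; fuel 10 always suffices since age % 10 ∈ [0,9],
-- so the loop condition fails within at most 9 increments (proved in age_round_loop_eq)
def age_round_loop : Nat → Int → Int
  | 0, age => age
  | k + 1, age => if PySem.Int.mod age 10 ≠ 0 then age_round_loop k (age + 1) else age

def age_round (age : Int) : Int :=
  if age > 80 then 80
  else if age < 10 then 10
  else age_round_loop 10 age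

-- ===== PORT B =====
def age_round_alt (age : Int) : Int :=
  if age > 80 then 80
  else if age < 10 then 10
  else (PySem.Int.floordiv (age + 9) 10) * 10

-- ===== PRECONDITION & SPEC =====
def Spec_age_round (age : Int) (out : Int) : Prop := out = age_round_alt age
instance (age : Int) (out : Int) : Decidable (Spec_age_round age out) := by unfold Spec_age_round; infer_instance

-- ===== CLAIM (what is proved, stated in full; the proofs are below) =====
def Claim_equal_age_round : Prop := ∀ (age : Int), Dom_age_round age → Spec_age_round age (age_round age)

-- ===== LEMMAS AND PROOFS =====
theorem age_round_loop_eq (k : Nat) (age : Int)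
    (hk : ((10 - age % 10) % 10).toNat ≤ k) :
    age_round_loop k age = (PySem.Int.floordiv (age + 9) 10) * 10 := by
  induction k generalizing age with
  | zero =>
    simp only [age_round_loop]
    rw [PySem.Int.floordiv_eq_ediv_of_pos (by omega)]
    omega
  | succ k ih =>
    simp only [age_round_loop,
      PySem.Int.mod_eq_emod_of_pos (by omega : (0:Int) < 10)]
    by_cases h : age % 10 ≠ 0
    · rw [if_pos h, ih (age + 1) (by omega)]
      rw [PySem.Int.floordiv_eq_ediv_of_pos (by omega),
          PySem.Int.floordiv_eq_ediv_of_pos (by omega)]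
      omega
    · rw [if_neg h]
      rw [PySem.Int.floordiv_eq_ediv_of_pos (by omega)]
      omega

-- ===== VERDICT (by name: the statement is the Claim_ definition above) =====
theorem age_round_spec : Claim_equal_age_round := by
  intro age _
  unfold Spec_age_round age_round age_round_alt
  split_ifs <;> simp [age_round_loop_eq 10 age (by omega)]
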